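-- pv_equiv track=rewrite | github.com/jeffbruce/SpredNonDicomUpload | jeffs_utilities.py | convert_decimal_to_base
-- ===== SOURCE A (Python) =====
-- def convert_decimal_to_base(n, base):
--     '''
--     Summary:
--         Convert positive decimal integer n to equivalent in another base (2-36).
--     Args:
--         n: A base 10 integer to be converted to some arbitrary base (2-36).
--         base: An integer specifying the base to convert the integer to.
--     Returns:
--         s: A string representing the integer of the new base.
--     '''
--
--     digits = "0123456789ABCDEFGHIJKLMNOPQRSTUVWXYZ"
--
--     try:
--         n = int(n)
--         base = int(base)
--     except:
--         return ""
--
--     if n < 0 or base < 2 or base > 36: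
--         return ""
--
--     s = ""
--     while 1:
--         r = n % base
--         s = digits[r] + s
--         n = n / base
--         if n == 0:
--             break
--
--     return s
-- ===== SOURCE B (Python) =====
-- def convert_decimal_to_base(n, base):
--     digits = "0123456789ABCDEFGHIJKLMNOPQRSTUVWXYZ"
--     try:
--         n = int(n)
--         base = int(base)
--     except Exception:
--         return ""
--     if n < 0 or base < 2 or base > 36:
--         return ""
--     def rec(m):
--         if m < base:
--             return digits[m]
--         return rec(m // base) + digits[m % base]
--     return rec(n)
-- ===== Notes on version B (the rewrite author's own statement) =====
-- stated objective: alternative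
-- what changed: Replaces A's digit-prepending while-loop (which under Python 3 feeds a float back into n via '/' and crashes) with linear recursion on the quotient that builds the string most-significant digit first; B actually converts positive numbers.
-- crash fix: For every n > 0 with 2 <= base <= 36, A raises TypeError (n = n / base makes n a float, so digits[r] gets a float index on the next iteration), while B returns the base-`base` representation of n, e.g. '101' for (5, 2). — e.g. on convert_decimal_to_base(5, 2): A raises TypeError, B returns "101"
import Mathlib
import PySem

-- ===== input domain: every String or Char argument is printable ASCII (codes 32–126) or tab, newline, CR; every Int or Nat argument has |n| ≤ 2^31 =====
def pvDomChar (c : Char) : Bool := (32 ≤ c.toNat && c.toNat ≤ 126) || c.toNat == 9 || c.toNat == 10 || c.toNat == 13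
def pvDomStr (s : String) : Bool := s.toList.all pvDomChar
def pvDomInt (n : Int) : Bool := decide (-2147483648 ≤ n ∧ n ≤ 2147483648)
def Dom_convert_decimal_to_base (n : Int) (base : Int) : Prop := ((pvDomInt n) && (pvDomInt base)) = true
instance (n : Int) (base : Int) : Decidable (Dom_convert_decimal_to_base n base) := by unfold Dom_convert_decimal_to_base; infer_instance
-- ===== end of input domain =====

-- B replaces A's digit-prepending while-loop (which under Python 3 crashes for every n > 0 because
-- 'n = n / base' turns n into a float) with a working linear recursion on the quotient, building the
-- string most-significant digit first.

-- digits[r] for an Int index r (exact: in every reachable call 0 ≤ r < 36, inside range)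
def pvDigit (r : Int) : String :=
  (PySem.List.pyGet? "0123456789ABCDEFGHIJKLMNOPQRSTUVWXYZ".toList r).elim "" (fun c => String.ofList [c])

-- ===== PORT A =====
-- A's 'while 1' loop, step for step ('n = n / base' ported as floor division: inside Pre_ the loop
-- body runs only with n = 0, where '/' and '//' agree; fuel only makes the recursion total).
def pvALoop (base : Int) : Nat → Int → String → String
  | 0, _, s => s
  | fuel + 1, n, s =>
    let r := PySem.Int.mod n base
    let s' := pvDigit r ++ s
    let n' := PySem.Int.floordiv n base
    if n' = 0 then s' else pvALoop base fuel n' s'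

def convert_decimal_to_base (n : Int) (base : Int) : String :=
  if n < 0 ∨ base < 2 ∨ base > 36 then ""
  else pvALoop base (n.toNat + 1) n ""

-- ===== PORT B =====
def pvBRec (base : Int) : Nat → Int → String
  | 0, m => pvDigit m   -- fuel exhausted (unreachable: m shrinks by a factor ≥ 2 each call)
  | fuel + 1, m =>
    if m < base then pvDigit m
    else pvBRec base fuel (PySem.Int.floordiv m base) ++ pvDigit (PySem.Int.mod m base)

def convert_decimal_to_base_alt (n : Int) (base : Int) : String :=
  if n < 0 ∨ base < 2 ∨ base > 36 then ""
  else pvBRec base (n.toNat + 1) n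

-- ===== PRECONDITION & SPEC =====
-- Pre_ excludes exactly the inputs where A raises TypeError (every n > 0 with a valid base:
-- 'n = n / base' makes n a float and digits[r] then gets a float index).
def Pre_convert_decimal_to_base (n : Int) (base : Int) : Prop := n ≤ 0 ∨ base < 2 ∨ base > 36
instance (n : Int) (base : Int) : Decidable (Pre_convert_decimal_to_base n base) := by
  unfold Pre_convert_decimal_to_base; infer_instance

def pvWitness_convert_decimal_to_base : Int × Int := (0, 2)

-- For every n > 0 with 2 ≤ base ≤ 36, A raises TypeError while B returns the base representation.
def Raises_convert_decimal_to_base (n : Int) (base : Int) : Prop := 0 < n ∧ 2 ≤ base ∧ base ≤ 36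
instance (n : Int) (base : Int) : Decidable (Raises_convert_decimal_to_base n base) := by
  unfold Raises_convert_decimal_to_base; infer_instance
def pvRaiseWitness_convert_decimal_to_base : Int × Int := (5, 2)
def pvRaiseWitnessOut_convert_decimal_to_base : String := "101"

def Spec_convert_decimal_to_base (n : Int) (base : Int) (out : String) : Prop := out = convert_decimal_to_base_alt n base
instance (n : Int) (base : Int) (out : String) : Decidable (Spec_convert_decimal_to_base n base out) := by unfold Spec_convert_decimal_to_base; infer_instance

-- ===== CLAIM (what is proved, stated in full; the proofs are below) =====
def Claim_equal_convert_decimal_to_base : Prop := ∀ (n : Int) (base : Int), Dom_convert_decimal_to_base n base → Pre_convert_decimal_to_base n base → Spec_convert_decimal_to_base n base (convert_decimal_to_base n base)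

def Claim_raises_convert_decimal_to_base : Prop := (∀ (n : Int) (base : Int), Dom_convert_decimal_to_base n base → Raises_convert_decimal_to_base n base → ¬ Pre_convert_decimal_to_base n base) ∧ (Dom_convert_decimal_to_base (pvRaiseWitness_convert_decimal_to_base.1) (pvRaiseWitness_convert_decimal_to_base.2) ∧ Raises_convert_decimal_to_base (pvRaiseWitness_convert_decimal_to_base.1) (pvRaiseWitness_convert_decimal_to_base.2) ∧ convert_decimal_to_base_alt (pvRaiseWitness_convert_decimal_to_base.1) (pvRaiseWitness_convert_decimal_to_base.2) = pvRaiseWitnessOut_convert_decimal_to_base)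

-- ===== LEMMAS AND PROOFS =====

-- ===== VERDICT (by name: the statement is the Claim_ definition above) =====
theorem convert_decimal_to_base_spec : Claim_equal_convert_decimal_to_base := by
  intro n base _ hpre
  unfold Spec_convert_decimal_to_base convert_decimal_to_base convert_decimal_to_base_alt
  by_cases hg : n < 0 ∨ base < 2 ∨ base > 36
  · rw [if_pos hg, if_pos hg]
  · have hn : n = 0 := by unfold Pre_convert_decimal_to_base at hpre; omega
    have hb : 2 ≤ base ∧ base ≤ 36 := by omega
    subst hn
    obtain ⟨h1, h2⟩ := hb
    interval_cases base <;> decide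

def convert_decimal_to_base_raises : Claim_raises_convert_decimal_to_base := by
  unfold Claim_raises_convert_decimal_to_base
  refine ⟨?_, by decide⟩
  intro n base _ hr
  unfold Raises_convert_decimal_to_base at hr
  unfold Pre_convert_decimal_to_base
  omega
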